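-- pv_equiv track=rewrite | github.com/IvanKalug-QA/codewars | Balance_the_parentheses.py | fix_parentheses
-- ===== SOURCE A (Python) =====
-- def fix_parentheses(strng):
--     balance = 0
--     need_open = 0
--
--     for ch in strng:
--         if ch == '(':
--             balance += 1
--         elif ch == ')':
--             balance -= 1
--         if balance < 0:
--             need_open += 1
--             balance = 0
--
--     need_close = balance
--
--     return '(' * need_open + strng + ')' * need_close
-- ===== SOURCE B (Python) =====
-- def fix_parentheses(strng):
--     ps = ''.join(c for c in strng if c in '()')
--     while '()' in ps:
--         ps = ps.replace('()', '')
--     need_open = ps.count(')')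
--     need_close = ps.count('(')
--     return '(' * need_open + strng + ')' * need_close
-- ===== Notes on version B (the rewrite author's own statement) =====
-- stated objective: alternative
-- what changed: B keeps no running counter at all: it filters out the parentheses, repeatedly cancels matched '()' pairs until a fixpoint ')'^a '('^b remains, and reads need_open/need_close off as the counts of ')' and '(' in that normal form.
import Mathlib
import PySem

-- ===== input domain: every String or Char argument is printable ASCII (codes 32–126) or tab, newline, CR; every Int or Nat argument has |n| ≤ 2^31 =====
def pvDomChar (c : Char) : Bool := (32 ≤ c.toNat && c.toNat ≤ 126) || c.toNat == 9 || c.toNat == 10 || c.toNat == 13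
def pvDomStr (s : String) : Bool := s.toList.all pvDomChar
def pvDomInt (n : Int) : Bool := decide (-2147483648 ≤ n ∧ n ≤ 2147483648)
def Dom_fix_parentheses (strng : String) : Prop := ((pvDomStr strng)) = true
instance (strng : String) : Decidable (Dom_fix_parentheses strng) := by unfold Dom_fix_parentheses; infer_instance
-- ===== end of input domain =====

-- B replaces A's counter loop by cancelling matched '()' pairs to a fixpoint and counting the leftovers.

-- ===== PORT A =====
-- A's loop state: (balance, need_open); balance is clamped to 0 whenever it drops below.
def fixParA_step (st : Int × Int) (ch : Char) : Int × Int :=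
  let balance := if ch = '(' then st.1 + 1 else if ch = ')' then st.1 - 1 else st.1
  if balance < 0 then (0, st.2 + 1) else (balance, st.2)

def fix_parentheses (strng : String) : String :=
  let st := strng.toList.foldl fixParA_step (0, 0)
  String.ofList (List.replicate st.2.toNat '(') ++ strng ++ String.ofList (List.replicate st.1.toNat ')')

-- ===== PORT B =====
-- c in '()'
def fixParB_isParen (c : Char) : Bool := c = '(' || c = ')'

-- '()' in ps  (substring test for the two-character pattern)
def fixParB_hasPair : List Char → Bool
  | '(' :: ')' :: _ => true
  | _ :: t => fixParB_hasPair t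
  | [] => false

-- ps.replace('()', ''): remove non-overlapping occurrences left to right
def fixParB_replace : List Char → List Char
  | '(' :: ')' :: t => fixParB_replace t
  | c :: t => c :: fixParB_replace t
  | [] => []

theorem fixParB_replace_length_le (l : List Char) : (fixParB_replace l).length ≤ l.length := by
  induction l using fixParB_replace.induct <;> simp [fixParB_replace] <;> omega

theorem fixParB_replace_length_lt (l : List Char) (h : fixParB_hasPair l = true) :
    (fixParB_replace l).length < l.length := by
  induction l using fixParB_replace.induct with
  | case1 t ih =>
      have := fixParB_replace_length_le t
      simp only [fixParB_replace, List.length_cons]; omega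
  | case2 c t hne ih =>
      have hp : fixParB_hasPair (c :: t) = fixParB_hasPair t := by
        cases t with
        | nil => simp [fixParB_hasPair] at h
        | cons d t' =>
            by_cases hc : c = '(' <;> by_cases hd : d = ')' <;>
              simp_all [fixParB_hasPair]
      rw [hp] at h
      have := ih h
      simp only [fixParB_replace, List.length_cons]
      omega
  | case3 => simp [fixParB_hasPair] at h

-- while '()' in ps: ps = ps.replace('()', '')
def fixParB_reduce (l : List Char) : List Char :=
  if h : fixParB_hasPair l = true then fixParB_reduce (fixParB_replace l) else l
termination_by l.length
decreasing_by exact fixParB_replace_length_lt l h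

def fix_parentheses_alt (strng : String) : String :=
  let ps := strng.toList.filter fixParB_isParen
  let ps := fixParB_reduce ps
  let need_open := ps.count ')'
  let need_close := ps.count '('
  String.ofList (List.replicate need_open '(') ++ strng ++ String.ofList (List.replicate need_close ')')

-- ===== PRECONDITION & SPEC =====
def Spec_fix_parentheses (strng : String) (out : String) : Prop := out = fix_parentheses_alt strng
instance (strng : String) (out : String) : Decidable (Spec_fix_parentheses strng out) := by unfold Spec_fix_parentheses; infer_instance

-- ===== CLAIM =====
def Claim_equal_fix_parentheses : Prop := ∀ (strng : String), Dom_fix_parentheses strng → Spec_fix_parentheses strng (fix_parentheses strng)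

-- ===== LEMMAS AND PROOFS =====

theorem fixParA_step_nonneg (st : Int × Int) (c : Char) : 0 ≤ (fixParA_step st c).1 := by
  simp only [fixParA_step]; split_ifs <;> simp <;> omega

-- non-paren characters leave A's state unchanged (given a nonnegative balance)
theorem fixParA_filter (l : List Char) (b o : Int) (hb : 0 ≤ b) :
    l.foldl fixParA_step (b, o) = (l.filter fixParB_isParen).foldl fixParA_step (b, o) := by
  induction l generalizing b o with
  | nil => rfl
  | cons c t ih =>
    by_cases hc : fixParB_isParen c = true
    · simp only [List.foldl_cons, List.filter_cons, hc, if_pos]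
      have h1 := fixParA_step_nonneg (b, o) c
      have := ih (fixParA_step (b, o) c).1 (fixParA_step (b, o) c).2 h1
      simpa using this
    · have hstep : fixParA_step (b, o) c = (b, o) := by
        simp only [fixParB_isParen, Bool.or_eq_true, decide_eq_true_eq, not_or] at hc
        simp only [fixParA_step, if_neg hc.1, if_neg hc.2]
        simp; omega
      simp only [List.foldl_cons, List.filter_cons, hc, if_neg, hstep, Bool.false_eq_true,
        ite_false]
      exact ih b o hb

-- removing matched '()' pairs does not change A's fold (given a nonnegative balance)
theorem fixParA_replace (l : List Char) (b o : Int) (hb : 0 ≤ b) :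
    l.foldl fixParA_step (b, o) = (fixParB_replace l).foldl fixParA_step (b, o) := by
  induction l using fixParB_replace.induct generalizing b o with
  | case1 t ih =>
      have h1 : fixParA_step (b, o) '(' = (b + 1, o) := by
        simp [fixParA_step]; omega
      have h2 : fixParA_step (b + 1, o) ')' = (b, o) := by
        simp [fixParA_step]; omega
      simp only [fixParB_replace, List.foldl_cons, h1, h2]
      exact ih b o hb
  | case2 c t _ ih =>
      simp only [fixParB_replace, List.foldl_cons]
      have h1 := fixParA_step_nonneg (b, o) c
      have := ih (fixParA_step (b, o) c).1 (fixParA_step (b, o) c).2 h1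
      simpa using this
  | case3 => rfl

theorem fixParA_reduce (l : List Char) (b o : Int) (hb : 0 ≤ b) :
    l.foldl fixParA_step (b, o) = (fixParB_reduce l).foldl fixParA_step (b, o) := by
  induction l using fixParB_reduce.induct generalizing b o with
  | case1 l hp ih =>
    rw [fixParB_reduce, dif_pos hp, fixParA_replace l b o hb]
    exact ih b o hb
  | case2 l hp => rw [fixParB_reduce, dif_neg hp]

theorem fixParB_reduce_noPair (l : List Char) : fixParB_hasPair (fixParB_reduce l) = false := by
  induction l using fixParB_reduce.induct with
  | case1 l hp ih => rw [fixParB_reduce, dif_pos hp]; exact ih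
  | case2 l hp => rw [fixParB_reduce, dif_neg hp]; simpa using hp

theorem fixParB_replace_subset (l : List Char) (c : Char) (h : c ∈ fixParB_replace l) : c ∈ l := by
  induction l using fixParB_replace.induct with
  | case1 t ih => simp only [fixParB_replace] at h; simp [ih h]
  | case2 d t _ ih =>
      simp only [fixParB_replace, List.mem_cons] at h
      rcases h with h | h
      · simp [h]
      · simp [ih h]
  | case3 => simpa [fixParB_replace] using h

theorem fixParB_reduce_subset (l : List Char) (c : Char) (h : c ∈ fixParB_reduce l) : c ∈ l := by
  induction l using fixParB_reduce.induct with
  | case1 l hp ih =>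
    rw [fixParB_reduce, dif_pos hp] at h
    exact fixParB_replace_subset l c (ih h)
  | case2 l hp =>
    rwa [fixParB_reduce, dif_neg hp] at h

-- in a paren-only pair-free list, nothing after a '(' is ')'
theorem fixParB_noCloseAfterOpen (t : List Char)
    (hpar : ∀ c ∈ t, fixParB_isParen c = true)
    (hnp : fixParB_hasPair ('(' :: t) = false) : ')' ∉ t := by
  induction t with
  | nil => simp
  | cons c t' ih =>
    have hc' : c ≠ ')' := by
      intro hc; subst hc; simp [fixParB_hasPair] at hnp
    have hcp := hpar c (by simp)
    have hc : c = '(' := by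
      simp only [fixParB_isParen, Bool.or_eq_true, decide_eq_true_eq] at hcp
      tauto
    subst hc
    have hnp' : fixParB_hasPair ('(' :: t') = false := by
      simpa [fixParB_hasPair] using hnp
    have := ih (fun d hd => hpar d (by simp [hd])) hnp'
    simp only [List.mem_cons, not_or]
    exact ⟨Ne.symm hc', this⟩

theorem fixParA_allOpen (t : List Char) (b o : Int) (hb : 0 ≤ b)
    (h : ∀ c ∈ t, c = '(') : t.foldl fixParA_step (b, o) = (b + t.length, o) := by
  induction t generalizing b with
  | nil => simp
  | cons c t' ih =>
    have hc := h c (by simp)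
    subst hc
    have hstep : fixParA_step (b, o) '(' = (b + 1, o) := by simp [fixParA_step]; omega
    simp only [List.foldl_cons, hstep]
    rw [ih (b + 1) (by omega) (fun d hd => h d (by simp [hd]))]
    simp [List.length_cons]; omega

-- A's fold on a paren-only, pair-free list reads off the two counts
theorem fixParA_normal (l : List Char) (o : Int)
    (hpar : ∀ c ∈ l, fixParB_isParen c = true)
    (hnp : fixParB_hasPair l = false) :
    l.foldl fixParA_step (0, o) = ((l.count '(' : Int), o + (l.count ')' : Int)) := by
  induction l generalizing o with
  | nil => simp
  | cons c t ih =>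
    have hcp := hpar c (by simp)
    simp only [fixParB_isParen, Bool.or_eq_true, decide_eq_true_eq] at hcp
    rcases hcp with hc | hc <;> subst hc
    · -- head '(' : the rest is all '('
      have hno : ')' ∉ t :=
        fixParB_noCloseAfterOpen t (fun d hd => hpar d (by simp [hd])) hnp
      have hall : ∀ d ∈ t, d = '(' := by
        intro d hd
        have := hpar d (by simp [hd])
        simp only [fixParB_isParen, Bool.or_eq_true, decide_eq_true_eq] at this
        rcases this with h | h
        · exact h
        · exact absurd (h ▸ hd) hno
      have hstep : fixParA_step (0, o) '(' = (1, o) := by simp [fixParA_step]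
      simp only [List.foldl_cons, hstep]
      rw [fixParA_allOpen t 1 o (by omega) hall]
      have hc1 : t.count '(' = t.length := List.count_eq_length.mpr (fun d hd => ((hall d hd) ▸ rfl))
      have hc2 : t.count ')' = 0 := List.count_eq_zero.mpr hno
      simp [List.count_cons, hc1, hc2]
      omega
    · -- head ')' : balance dips, A clamps and counts
      have hstep : fixParA_step (0, o) ')' = (0, o + 1) := by simp [fixParA_step]
      have hnp' : fixParB_hasPair t = false := by
        cases t <;> simpa [fixParB_hasPair] using hnp
      simp only [List.foldl_cons, hstep]
      rw [ih (o + 1) (fun d hd => hpar d (by simp [hd])) hnp']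
      simp [List.count_cons]
      omega

-- ===== VERDICT =====
theorem fix_parentheses_spec : Claim_equal_fix_parentheses := by
  intro strng _
  unfold Spec_fix_parentheses fix_parentheses fix_parentheses_alt
  set l := strng.toList with hl
  set r := fixParB_reduce (l.filter fixParB_isParen) with hr
  have hpar : ∀ c ∈ r, fixParB_isParen c = true := by
    intro c hc
    have := fixParB_reduce_subset _ c hc
    exact List.of_mem_filter this
  have hnp : fixParB_hasPair r = false := fixParB_reduce_noPair _
  have hfold : l.foldl fixParA_step (0, 0) = ((r.count '(' : Int), (r.count ')' : Int)) := by
    rw [fixParA_filter l 0 0 le_rfl, fixParA_reduce _ 0 0 le_rfl, ← hr,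
      fixParA_normal r 0 hpar hnp]
    simp
  rw [hfold]
  simp only [Int.toNat_natCast]
  rw [← hr]
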